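-- pv_equiv track=rewrite | github.com/imikaa/pees | main.py | query_valid
-- ===== SOURCE A (Python) =====
-- def query_valid( tokens ) :
--     bool_oprtators = [ 'and', 'or', 'not' ]
--     nbr_tokens = len( tokens )
--     previous = 'blank'
--     for i in range( nbr_tokens ) :
--         if tokens[i] in bool_oprtators :
--             if tokens[i] == 'not' :
--                 if i == nbr_tokens-1 :
--                     return False
--                 if previous == 'bool_not' :
--                     return False
--                 previous = 'bool_not'
--             else :
--                 if i == 0 or i == nbr_tokens-1 :
--                     return False
--                 if previous in ['bool_op', 'bool_not'] :
--                     return False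
--                 previous = 'bool_op'
--         else :
--             if previous == 'word' :
--                 return False
--             if i != nbr_tokens-1 and tokens[i+1] == 'not' :
--                 return False
--             previous = 'word'
--     return True
-- ===== SOURCE B (Python) =====
-- def query_valid(tokens):
--     def cat(t):
--         if t == 'and' or t == 'or':
--             return 'O'
--         if t == 'not':
--             return 'N'
--         return 'W'
--     cats = [cat(t) for t in tokens]
--     if not cats:
--         return True
--     if cats[0] == 'O' or cats[-1] in ('O', 'N'):
--         return False
--     forbidden = {('W', 'W'), ('W', 'N'), ('O', 'O'), ('N', 'O'), ('N', 'N')}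
--     return all(p not in forbidden for p in zip(cats, cats[1:]))
-- ===== Notes on version B (the rewrite author's own statement) =====
-- stated objective: alternative
-- what changed: Replaces A's single-pass index loop with a 'previous'-state machine and early returns by a precompute step (map every token to a category O/N/W) followed by table-driven checks: first/last-category rules plus a forbidden-adjacent-pair set over zipped neighbours.
import Mathlib
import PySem

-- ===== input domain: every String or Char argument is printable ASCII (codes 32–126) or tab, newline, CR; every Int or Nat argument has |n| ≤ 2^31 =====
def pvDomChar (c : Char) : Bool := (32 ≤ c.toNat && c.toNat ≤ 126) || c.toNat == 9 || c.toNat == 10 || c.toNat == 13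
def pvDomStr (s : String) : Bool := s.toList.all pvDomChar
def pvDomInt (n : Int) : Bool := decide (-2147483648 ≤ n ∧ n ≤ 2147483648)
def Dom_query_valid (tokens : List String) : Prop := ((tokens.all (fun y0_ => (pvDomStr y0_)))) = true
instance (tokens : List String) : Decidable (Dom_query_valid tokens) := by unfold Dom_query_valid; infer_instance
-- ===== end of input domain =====

-- B replaces A's single-pass previous-state machine by a categorize-then-check pass
-- (map tokens to categories, then first/last rules plus a forbidden-adjacent-pair table);
-- alternative decomposition of the same O(n) task.

-- ===== PORT A =====
-- A's for-i loop with early returns, as index recursion over the same state 'previous'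
def qvGo (tokens : List String) (n : Nat) (i : Nat) (previous : String) : Bool :=
  if _h : i < n then
    let t := tokens.getD i ""
    if (["and", "or", "not"] : List String).contains t then
      if t == "not" then
        if i == n - 1 then false
        else if previous == "bool_not" then false
        else qvGo tokens n (i + 1) "bool_not"
      else
        if i == 0 || i == n - 1 then false
        else if previous == "bool_op" || previous == "bool_not" then false
        else qvGo tokens n (i + 1) "bool_op"
    else
      if previous == "word" then false
      else if i != n - 1 && tokens.getD (i + 1) "" == "not" then false
      else qvGo tokens n (i + 1) "word"
  else true
termination_by n - i

def query_valid (tokens : List String) : Bool :=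
  qvGo tokens tokens.length 0 "blank"

-- ===== PORT B =====
def pvCat (t : String) : String :=
  if t == "and" || t == "or" then "O" else if t == "not" then "N" else "W"

def pvForbidden (p : String × String) : Bool :=
  (p.1 == "W" && p.2 == "W") || (p.1 == "W" && p.2 == "N") ||
  (p.1 == "O" && p.2 == "O") || (p.1 == "N" && p.2 == "O") || (p.1 == "N" && p.2 == "N")

def query_valid_alt (tokens : List String) : Bool :=
  let cats := tokens.map pvCat
  if cats.isEmpty then true
  else if cats.headD "" == "O" || (cats.getLastD "" == "O" || cats.getLastD "" == "N") then false
  else (cats.zip cats.tail).all (fun p => !pvForbidden p)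

-- ===== PRECONDITION & SPEC =====
def Spec_query_valid (tokens : List String) (out : Bool) : Prop := out = query_valid_alt tokens
instance (tokens : List String) (out : Bool) : Decidable (Spec_query_valid tokens out) := by unfold Spec_query_valid; infer_instance

-- ===== CLAIM (what is proved, stated in full; the proofs are below) =====
def Claim_equal_query_valid : Prop := ∀ (tokens : List String), Dom_query_valid tokens → Spec_query_valid tokens (query_valid tokens)

-- ===== LEMMAS AND PROOFS =====

-- proof-side recursive characterisation of A's loop, over the category list
def chk : String → List String → Bool
  | _, [] => true
  | p, c :: rest =>
    if c == "N" then
      if rest.isEmpty then false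
      else if p == "bool_not" then false
      else chk "bool_not" rest
    else if c == "O" then
      if p == "blank" || rest.isEmpty then false
      else if p == "bool_op" || p == "bool_not" then false
      else chk "bool_op" rest
    else
      if p == "word" then false
      else if !rest.isEmpty && rest.headD "" == "N" then false
      else chk "word" rest

def pairsOK : List String → Bool
  | a :: b :: rest => !pvForbidden (a, b) && pairsOK (b :: rest)
  | _ => true

def lastOK (cs : List String) : Bool :=
  cs.isEmpty || !(cs.getLastD "" == "O" || cs.getLastD "" == "N")

lemma zip_all_eq_pairsOK (cs : List String) :
    (cs.zip cs.tail).all (fun p => !pvForbidden p) = pairsOK cs := by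
  match cs with
  | [] => rfl
  | [a] => rfl
  | a :: b :: rest =>
    simp only [List.tail_cons, List.zip_cons_cons, List.all_cons, pairsOK]
    rw [← zip_all_eq_pairsOK (b :: rest)]
    rfl

lemma lastOK_cons (c : String) (cs : List String) (h : cs ≠ []) :
    lastOK (c :: cs) = lastOK cs := by
  cases cs with
  | nil => exact absurd rfl h
  | cons b bs =>
    simp [lastOK, List.getLastD_eq_getLast?, List.getLast?_cons_cons]

lemma pvCat_mem (x : String) : pvCat x = "W" ∨ pvCat x = "O" ∨ pvCat x = "N" := by
  unfold pvCat; split_ifs <;> simp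

lemma chk_gen (cs : List String) : ∀ (p pc : String),
    ((p, pc) = ("word", "W") ∨ (p, pc) = ("bool_op", "O") ∨ (p, pc) = ("bool_not", "N")) →
    (pc = "W" → cs.headD "" ≠ "N") →
    (∀ c ∈ cs, c = "W" ∨ c = "O" ∨ c = "N") →
    chk p cs = (pairsOK (pc :: cs) && lastOK cs) := by
  induction cs with
  | nil => intro p pc hp _ _; simp [chk, pairsOK, lastOK]
  | cons c rest ih =>
    intro p pc hp hW hcs
    have hc : c = "W" ∨ c = "O" ∨ c = "N" := hcs c (by simp)
    have hrest : ∀ x ∈ rest, x = "W" ∨ x = "O" ∨ x = "N" := fun x hx => hcs x (by simp [hx])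
    rcases hp with hp | hp | hp <;> (rw [Prod.mk.injEq] at hp; obtain ⟨rfl, rfl⟩ := hp) <;>
      rcases hc with rfl | rfl | rfl
    · -- word W W
      simp [chk, pairsOK, pvForbidden]
    · -- word W O
      cases rest with
      | nil => simp [chk, pairsOK, pvForbidden, lastOK]
      | cons b bs =>
        have hih := ih "bool_op" "O" (by simp) (by simp) hrest
        rw [chk]
        simp [hih, pairsOK, pvForbidden, lastOK_cons _ _ (List.cons_ne_nil b bs)]
    · -- word W N : contradiction via hW
      have h := hW rfl; simp at h
    · -- bool_op O W
      cases rest with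
      | nil => simp [chk, pairsOK, pvForbidden, lastOK]
      | cons b bs =>
        by_cases hbN : b = "N"
        · subst hbN; simp [chk, pairsOK, pvForbidden]
        · have hih := ih "word" "W" (by simp) (by simpa using hbN) hrest
          rw [chk]
          simp [hih, hbN, pairsOK, pvForbidden, lastOK_cons _ _ (List.cons_ne_nil b bs)]
    · -- bool_op O O
      simp [chk, pairsOK, pvForbidden]
    · -- bool_op O N
      cases rest with
      | nil => simp [chk, pairsOK, pvForbidden, lastOK]
      | cons b bs =>
        have hih := ih "bool_not" "N" (by simp) (by simp) hrest
        rw [chk]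
        simp [hih, pairsOK, pvForbidden, lastOK_cons _ _ (List.cons_ne_nil b bs)]
    · -- bool_not N W
      cases rest with
      | nil => simp [chk, pairsOK, pvForbidden, lastOK]
      | cons b bs =>
        by_cases hbN : b = "N"
        · subst hbN; simp [chk, pairsOK, pvForbidden]
        · have hih := ih "word" "W" (by simp) (by simpa using hbN) hrest
          rw [chk]
          simp [hih, hbN, pairsOK, pvForbidden, lastOK_cons _ _ (List.cons_ne_nil b bs)]
    · -- bool_not N O
      simp [chk, pairsOK, pvForbidden]
    · -- bool_not N N
      simp [chk, pairsOK, pvForbidden]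

lemma chk_blank (cs : List String)
    (hcs : ∀ c ∈ cs, c = "W" ∨ c = "O" ∨ c = "N") :
    chk "blank" cs =
      (if cs.isEmpty then true
       else if cs.headD "" == "O" || (cs.getLastD "" == "O" || cs.getLastD "" == "N") then false
       else pairsOK cs) := by
  cases cs with
  | nil => rfl
  | cons c rest =>
    have hrest : ∀ x ∈ rest, x = "W" ∨ x = "O" ∨ x = "N" := fun x hx => hcs x (by simp [hx])
    rcases hcs c (by simp) with rfl | rfl | rfl
    · -- W
      cases rest with
      | nil => simp [chk, pairsOK]
      | cons b bs =>
        by_cases hbN : b = "N"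
        · subst hbN
          rw [chk]
          simp [pairsOK, pvForbidden]
        · rw [chk, chk_gen (b :: bs) "word" "W" (by simp) (by simpa using hbN) hrest]
          simp [hbN, lastOK, List.getLastD_eq_getLast?, List.getLast?_cons_cons, pairsOK, pvForbidden]
          by_cases h1 : (b :: bs).getLast?.getD "" = "O"
          · simp [h1]
          · by_cases h2 : (b :: bs).getLast?.getD "" = "N"
            · simp [h2]
            · simp [beq_eq_false_iff_ne.mpr h1, beq_eq_false_iff_ne.mpr h2, h1, h2]
    · -- O
      simp [chk]
    · -- N
      rw [chk]
      cases rest with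
      | nil => simp
      | cons b bs =>
        rw [chk_gen (b :: bs) "bool_not" "N" (by simp) (by simp) hrest]
        simp [lastOK, List.getLastD_eq_getLast?, List.getLast?_cons_cons, pairsOK, pvForbidden]
        by_cases h1 : (b :: bs).getLast?.getD "" = "O"
        · simp [h1]
        · by_cases h2 : (b :: bs).getLast?.getD "" = "N"
          · simp [h2]
          · simp [beq_eq_false_iff_ne.mpr h1, beq_eq_false_iff_ne.mpr h2, h1, h2]

lemma A_char : ∀ (k : Nat) (tokens : List String) (i : Nat) (previous : String),
    tokens.length - i = k → (i = 0 ↔ previous = "blank") →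
    qvGo tokens tokens.length i previous = chk previous ((tokens.drop i).map pvCat) := by
  intro k
  induction k with
  | zero =>
    intro tokens i prev hk _
    have hle : tokens.length ≤ i := by omega
    rw [qvGo]
    simp [Nat.not_lt.mpr hle, List.drop_eq_nil_of_le hle, chk]
  | succ k ihk =>
    intro tokens i prev hk hb
    have hi : i < tokens.length := by omega
    have hg : tokens[i]?.getD "" = tokens[i] := by
      simp [List.getElem?_eq_getElem hi]
    have hb' : ((i == 0) : Bool) = (prev == "blank") := by
      by_cases h0 : i = 0
      · simp [h0, hb.mp h0]
      · have hnb : prev ≠ "blank" := fun hB => h0 (hb.mpr hB)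
        simp [h0, beq_eq_false_iff_ne.mpr hnb]
    have e1 : pvCat "not" = "N" := rfl
    have e2 : pvCat "and" = "O" := rfl
    have e3 : pvCat "or" = "O" := rfl
    rw [qvGo, List.drop_eq_getElem_cons hi, List.map_cons]
    by_cases hL : i = tokens.length - 1
    · have hd : tokens.drop (i + 1) = [] := List.drop_eq_nil_of_le (by omega)
      rw [hd, List.map_nil]
      have hLb : (i == tokens.length - 1) = true := by simp [hL]
      by_cases hnot : tokens[i] = "not"
      · have hcN : pvCat tokens[i] = "N" := by rw [hnot]; rfl
        rw [chk]
        simp [hi, hnot, hLb, pvCat]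
      · by_cases hao : tokens[i] = "and" ∨ tokens[i] = "or"
        · have hcO : pvCat tokens[i] = "O" := by
            rcases hao with h | h <;> rw [h] <;> rfl
          rw [chk]
          rcases hao with h | h <;> simp [hi, h, hLb, pvCat]
        · have hao1 : tokens[i] ≠ "and" := fun h => hao (Or.inl h)
          have hao2 : tokens[i] ≠ "or" := fun h => hao (Or.inr h)
          have hcW : pvCat tokens[i] = "W" := by
            unfold pvCat; simp [hnot, hao1, hao2]
          have hrec := ihk tokens (i + 1) "word" (by omega) (by simp)
          rw [hd, List.map_nil] at hrec
          rw [chk]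
          simp [hi, hcW, hnot, hao1, hao2, hrec, chk]
          intro _
          exact Or.inl hL
    · have hi1 : i + 1 < tokens.length := by omega
      have hg1 : tokens[i + 1]?.getD "" = tokens[i + 1] := by
        simp [List.getElem?_eq_getElem hi1]
      rw [List.drop_eq_getElem_cons hi1, List.map_cons]
      have hne : (i == tokens.length - 1) = false := by simp [hL]
      by_cases hnot : tokens[i] = "not"
      · have hrec := ihk tokens (i + 1) "bool_not" (by omega) (by simp)
        rw [List.drop_eq_getElem_cons hi1, List.map_cons] at hrec
        have hcN : pvCat tokens[i] = "N" := by rw [hnot]; rfl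
        rw [chk]
        simp [hi, hnot, hne, hrec, e1]
      · by_cases hao : tokens[i] = "and" ∨ tokens[i] = "or"
        · have hrec := ihk tokens (i + 1) "bool_op" (by omega) (by simp)
          rw [List.drop_eq_getElem_cons hi1, List.map_cons] at hrec
          have hcO : pvCat tokens[i] = "O" := by
            rcases hao with h | h <;> rw [h] <;> rfl
          rw [chk]
          rcases hao with h | h <;> simp [hi, h, hne, hb', hrec, e2, e3]
        · have hao1 : tokens[i] ≠ "and" := fun h => hao (Or.inl h)
          have hao2 : tokens[i] ≠ "or" := fun h => hao (Or.inr h)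
          have hcW : pvCat tokens[i] = "W" := by
            unfold pvCat; simp [hnot, hao1, hao2]
          have hN : (pvCat tokens[i + 1] = "N") ↔ (tokens[i + 1] = "not") := by
            by_cases hx : tokens[i + 1] = "not"
            · simp [hx, pvCat]
            · by_cases hy : tokens[i + 1] = "and" ∨ tokens[i + 1] = "or"
              · rcases hy with h | h <;> simp [h, pvCat]
              · have h1 : tokens[i + 1] ≠ "and" := fun h => hy (Or.inl h)
                have h2 : tokens[i + 1] ≠ "or" := fun h => hy (Or.inr h)
                simp [pvCat, hx, h1, h2]
          have hrec := ihk tokens (i + 1) "word" (by omega) (by simp)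
          rw [List.drop_eq_getElem_cons hi1, List.map_cons] at hrec
          rw [chk]
          simp [hg1, hi, hcW, hnot, hao1, hao2, hN, hrec, hL]

-- ===== VERDICT (by name: the statement is the Claim_ definition above) =====
theorem query_valid_spec : Claim_equal_query_valid := by
  intro tokens _
  unfold Spec_query_valid
  have hA := A_char tokens.length tokens 0 "blank" (by omega) (by simp)
  have hcs : ∀ c ∈ tokens.map pvCat, c = "W" ∨ c = "O" ∨ c = "N" := by
    intro c hc
    obtain ⟨x, _, rfl⟩ := List.mem_map.mp hc
    exact pvCat_mem x
  rw [query_valid, hA, List.drop_zero, chk_blank _ hcs, query_valid_alt]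
  rw [← zip_all_eq_pairsOK]
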